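-- pv_equiv track=rewrite | github.com/SlapTurtle/DTU_ML_TWITTER | PythonApplication1/PythonApplication1/simple.py | single_sample_simple
-- ===== SOURCE A (Python) =====
-- def single_sample_simple(model, line):
-- 	score = 0
-- 	neutral_filter,max = 0,2
-- 	words = line.split(' ')
-- 	for word in words:
-- 		if word in model[2]:
-- 			neutral_filter += 1
-- 		elif word in model[1]:
-- 			score += 1
-- 		elif word in model[0]:
-- 			score -= 1
-- 		if neutral_filter == max:
-- 			return 2
-- 	return 0 if score < 0 else 1 if score > 0 else 2
-- ===== SOURCE B (Python) =====
-- def single_sample_simple(model, line):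
--     words = line.split(' ')
--     neg, pos, neu = model[0], model[1], model[2]
--     if sum(1 for w in words if w in neu) >= 2:
--         return 2
--     score = sum(1 for w in words if w not in neu and w in pos) \
--           - sum(1 for w in words if w not in neu and w not in pos and w in neg)
--     return 0 if score < 0 else 1 if score > 0 else 2
-- ===== Notes on version B (the rewrite author's own statement) =====
-- stated objective: simpler
-- what changed: Replaces the single stateful loop with early return by a neutral-word count test (>= 2 returns the constant 2 immediately) followed by two priority-respecting membership counts whose difference is sign-mapped; no mutable loop state or early exit remains.
import Mathlib
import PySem

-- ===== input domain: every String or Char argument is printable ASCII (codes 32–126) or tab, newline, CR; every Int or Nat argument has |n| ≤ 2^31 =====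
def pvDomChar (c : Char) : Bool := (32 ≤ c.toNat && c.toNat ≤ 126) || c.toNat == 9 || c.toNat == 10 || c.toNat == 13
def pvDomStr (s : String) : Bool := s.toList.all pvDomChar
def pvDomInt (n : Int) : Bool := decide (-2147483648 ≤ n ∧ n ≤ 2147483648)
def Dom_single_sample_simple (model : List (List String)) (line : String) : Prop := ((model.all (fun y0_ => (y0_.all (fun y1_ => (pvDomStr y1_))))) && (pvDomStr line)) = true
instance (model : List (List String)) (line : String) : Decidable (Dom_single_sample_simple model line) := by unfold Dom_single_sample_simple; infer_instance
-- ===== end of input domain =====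

-- B replaces A's stateful early-return loop by a neutral count test plus two priority-respecting membership counts (objective: simpler).
-- ===== PORT A =====
def ssLoopA (m0 m1 m2 : List String) : List String → Int → Int → Int
  | [], score, _ => if score < 0 then 0 else if score > 0 then 1 else 2
  | w :: ws, score, nf =>
    let st : Int × Int :=
      if w ∈ m2 then (score, nf + 1)
      else if w ∈ m1 then (score + 1, nf)
      else if w ∈ m0 then (score - 1, nf)
      else (score, nf)
    if st.2 == 2 then 2 else ssLoopA m0 m1 m2 ws st.1 st.2

def single_sample_simple (model : List (List String)) (line : String) : Int :=
  -- the three model lookups raise IndexError outside Pre_; the 0 default is never reached inside Pre_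
  match PySem.List.pyGet? model 2, PySem.List.pyGet? model 1, PySem.List.pyGet? model 0 with
  | some m2, some m1, some m0 =>
    ssLoopA m0 m1 m2 ((PySem.Str.split? line " ").getD []) 0 0
  | _, _, _ => 0

-- ===== PORT B =====
def single_sample_simple_alt (model : List (List String)) (line : String) : Int :=
  let words := (PySem.Str.split? line " ").getD []
  -- neg, pos, neu = model[0], model[1], model[2]; the [] defaults are only reached where Python raises (outside Pre_)
  let neg := (PySem.List.pyGet? model 0).getD []
  let pos := (PySem.List.pyGet? model 1).getD []
  let neu := (PySem.List.pyGet? model 2).getD []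
  if 2 ≤ words.countP (fun w => decide (w ∈ neu)) then 2
  else
    let score : Int :=
      (words.countP (fun w => decide (w ∉ neu ∧ w ∈ pos)) : Int)
      - (words.countP (fun w => decide (w ∉ neu ∧ w ∉ pos ∧ w ∈ neg)) : Int)
    if score < 0 then 0 else if score > 0 then 1 else 2

-- ===== PRECONDITION & SPEC =====
-- Pre_ excludes models with fewer than 3 classes, on which A raises IndexError at model[2].
def Pre_single_sample_simple (model : List (List String)) (line : String) : Prop :=
  3 ≤ model.length
instance (model : List (List String)) (line : String) : Decidable (Pre_single_sample_simple model line) := by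
  unfold Pre_single_sample_simple; infer_instance
def pvWitness_single_sample_simple : List (List String) × String :=
  ([["bad"], ["good"], ["the"]], "the good day")
def Spec_single_sample_simple (model : List (List String)) (line : String) (out : Int) : Prop := out = single_sample_simple_alt model line
instance (model : List (List String)) (line : String) (out : Int) : Decidable (Spec_single_sample_simple model line out) := by unfold Spec_single_sample_simple; infer_instance

-- ===== CLAIM (what is proved, stated in full; the proofs are below) =====
def Claim_equal_single_sample_simple : Prop := ∀ (model : List (List String)) (line : String), Dom_single_sample_simple model line → Pre_single_sample_simple model line → Spec_single_sample_simple model line (single_sample_simple model line)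

-- ===== LEMMAS AND PROOFS =====

-- Loop invariant: with at most one neutral word tallied so far, A's loop returns 2 as soon as
-- the running neutral tally plus the remaining neutral count reaches 2, and otherwise the
-- sign-mapping of the accumulated score plus B's two priority counts over the rest.
theorem ssLoopA_eq (m0 m1 m2 : List String) (ws : List String) (s : Int) (n : Int)
    (hn : n = 0 ∨ n = 1) :
    ssLoopA m0 m1 m2 ws s n =
      (if 2 ≤ n + (ws.countP (fun w => decide (w ∈ m2)) : Int) then 2
      else
        let t := s + (ws.countP (fun w => decide (w ∉ m2 ∧ w ∈ m1)) : Int)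
                   - (ws.countP (fun w => decide (w ∉ m2 ∧ w ∉ m1 ∧ w ∈ m0)) : Int)
        if t < 0 then 0 else if t > 0 then 1 else 2) := by
  induction ws generalizing s n with
  | nil =>
    simp only [ssLoopA, List.countP_nil]
    rcases hn with h | h <;> subst h <;> norm_num
  | cons w ws ih =>
    by_cases h2 : w ∈ m2
    · rcases hn with h | h <;> subst h
      · simp only [ssLoopA, List.countP_cons, h2, if_true, decide_true, decide_false,
          not_true, false_and, and_false, if_false, beq_iff_eq, zero_add]
        rw [if_neg (by norm_num), ih s 1 (Or.inr rfl)]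
        push_cast
        split_ifs <;> omega
      · simp only [ssLoopA, List.countP_cons, h2, if_true, decide_true, decide_false,
          not_true, false_and, and_false, if_false, beq_iff_eq]
        rw [if_pos (by norm_num), if_pos (by push_cast; omega)]
    · have hnf : ¬ (n = 2) := by omega
      by_cases h1 : w ∈ m1
      · simp only [ssLoopA, List.countP_cons, h2, h1, if_true, if_false, decide_true,
          decide_false, not_false_iff, true_and, and_true, false_and, and_false,
          not_true, beq_iff_eq, add_zero, Bool.false_eq_true]
        rw [if_neg hnf, ih (s + 1) n hn]
        push_cast
        split_ifs <;> omega
      · by_cases h0 : w ∈ m0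
        · simp only [ssLoopA, List.countP_cons, h2, h1, h0, if_true, if_false, decide_true,
            decide_false, not_false_iff, true_and, and_true, false_and, and_false,
            not_true, beq_iff_eq, add_zero, Bool.false_eq_true]
          rw [if_neg hnf, ih (s - 1) n hn]
          push_cast
          split_ifs <;> omega
        · simp only [ssLoopA, List.countP_cons, h2, h1, h0, if_true, if_false, decide_true,
            decide_false, not_false_iff, true_and, and_true, false_and, and_false,
            not_true, beq_iff_eq, add_zero, Bool.false_eq_true]
          rw [if_neg hnf, ih s n hn]

-- ===== VERDICT (by name: the statement is the Claim_ definition above) =====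
theorem single_sample_simple_spec : Claim_equal_single_sample_simple := by
  intro model line _ hpre
  unfold Pre_single_sample_simple at hpre
  unfold Spec_single_sample_simple single_sample_simple single_sample_simple_alt
  obtain ⟨a, b, c, rest, rfl⟩ : ∃ a b c rest, model = a :: b :: c :: rest := by
    match model, hpre with
    | a :: b :: c :: rest, _ => exact ⟨a, b, c, rest, rfl⟩
  have g0 : PySem.List.pyGet? (a :: b :: c :: rest) 0 = some a := by
    have h : (0:Int) ≤ (rest.length:Int) + 1 + 1 := by positivity
    simp [PySem.List.pyGet?, PySem.List.pyIdx?, h]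
  have g1 : PySem.List.pyGet? (a :: b :: c :: rest) 1 = some b := by
    have h : (0:Int) ≤ (rest.length:Int) + 1 := by positivity
    simp [PySem.List.pyGet?, PySem.List.pyIdx?, h]
  have g2 : PySem.List.pyGet? (a :: b :: c :: rest) 2 = some c := by
    have h : (2:Int) ≤ (rest.length:Int) + 1 + 1 := by omega
    simp [PySem.List.pyGet?, PySem.List.pyIdx?, h]
  simp only [g0, g1, g2, Option.getD_some]
  rw [ssLoopA_eq a b c _ 0 0 (Or.inl rfl)]
  simp only [zero_add]
  split_ifs <;> omega
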